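-- pv_equiv track=rewrite | github.com/brnldlw/skilled-trades-ai | scripts/patches/parts_replaced_dictation_only_patch.py | insert_after_value_control
-- ===== SOURCE A (Python) =====
-- def insert_after_value_control(source: str, value_marker: str, block: str, label: str) -> str:
--     idx = source.find(value_marker)
--     if idx == -1:
--         raise RuntimeError(f"Could not find value marker for: {label}")
--
--     textarea_close = source.find("</textarea>", idx)
--     self_close = source.find("/>", idx)
--
--     candidates = [x for x in (textarea_close, self_close) if x != -1]
--     if not candidates:
--         raise RuntimeError(f"Could not find control end for: {label}")
--
--     close_idx = min(candidates)
--     insert_at = close_idx + (len("</textarea>") if close_idx == textarea_close else len("/>"))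
--     return source[:insert_at] + block + source[insert_at:]
-- ===== SOURCE B (Python) =====
-- def insert_after_value_control(source: str, value_marker: str, block: str, label: str) -> str:
--     idx = source.find(value_marker)
--     if idx == -1:
--         raise RuntimeError(f"Could not find value marker for: {label}")
--     before, tail = source[:idx], source[idx:]
--     # decompose the tail with str.partition and rebuild the result from the
--     # pieces: cut at the first "/>", then look for a "</textarea>" inside the
--     # piece before it (no overlap between the two tokens is possible, so a
--     # "</textarea>" earlier than the first "/>" lies entirely in that piece)
--     head, close, rest = tail.partition("/>")
--     t_head, t_close, t_rest = head.partition("</textarea>")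
--     if t_close:
--         return before + t_head + t_close + block + t_rest + close + rest
--     if not close:
--         raise RuntimeError(f"Could not find control end for: {label}")
--     return before + head + close + block + rest
-- ===== Notes on version B (the rewrite author's own statement) =====
-- stated objective: alternative
-- what changed: Replaced A's two independent whole-string find() scans, candidates list, min() and index arithmetic plus slicing with a partition-based decomposition: cut the tail at the first "/>", partition the piece before it on "</textarea>" (non-overlap of the two tokens makes this equivalent to taking the earlier terminator), and rebuild the output by concatenating the pieces with no index arithmetic at all.
import Mathlib
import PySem

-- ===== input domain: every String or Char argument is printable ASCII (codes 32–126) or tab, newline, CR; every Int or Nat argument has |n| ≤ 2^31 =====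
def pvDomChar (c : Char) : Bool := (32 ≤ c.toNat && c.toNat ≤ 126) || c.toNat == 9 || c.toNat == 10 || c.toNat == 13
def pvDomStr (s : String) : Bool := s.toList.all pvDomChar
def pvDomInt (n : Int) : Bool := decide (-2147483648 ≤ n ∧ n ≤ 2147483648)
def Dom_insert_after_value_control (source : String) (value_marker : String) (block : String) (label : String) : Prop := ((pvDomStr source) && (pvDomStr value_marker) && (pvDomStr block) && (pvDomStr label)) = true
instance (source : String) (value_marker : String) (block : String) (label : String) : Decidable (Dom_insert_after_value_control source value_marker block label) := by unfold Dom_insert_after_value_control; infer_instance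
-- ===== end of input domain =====

-- B replaces A's two whole-string find() passes, candidates list, min() and index
-- arithmetic with a partition-based decomposition that rebuilds the output from pieces
-- (alternative decomposition, same cost class).


-- ===== PORT A =====
def insert_after_value_control (source : String) (value_marker : String) (block : String) (label : String) : String :=
  let idx := PySem.Str.find source value_marker
  if idx = -1 then ""  -- raise RuntimeError("Could not find value marker for: …")
  else
    let textarea_close := PySem.Str.findFrom source "</textarea>" idx
    let self_close := PySem.Str.findFrom source "/>" idx
    let candidates := [textarea_close, self_close].filter (fun x => x ≠ -1)
    if candidates = [] then ""  -- raise RuntimeError("Could not find control end for: …")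
    else
      match PySem.List.min? candidates (fun x => x) with
      | none => ""  -- unreachable: candidates nonempty
      | some close_idx =>
        let insert_at := close_idx + (if close_idx = textarea_close then (11 : Int) else 2)
        PySem.Str.slice source none (some insert_at) ++ block ++ PySem.Str.slice source (some insert_at) none

-- ===== PORT B =====
-- exact hand port of Python's str.partition(sep) for a NONEMPTY literal sep
-- (Source B only partitions on "/>" and "</textarea>"): first occurrence splits the
-- string into (before, sep, after); if absent, (s, "", "")
def pvPartition (s sep : List Char) : List Char × List Char × List Char :=
  let i := PySem.Chars.find s sep
  if i = -1 then (s, [], [])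
  else (s.take i.toNat, sep, s.drop (i.toNat + sep.length))

def insert_after_value_control_alt (source : String) (value_marker : String) (block : String) (label : String) : String :=
  let idx := PySem.Str.find source value_marker
  if idx = -1 then ""  -- raise RuntimeError("Could not find value marker for: …")
  else
    let before := PySem.Str.slice source none (some idx)
    let tail := PySem.Str.slice source (some idx) none
    match pvPartition tail.toList "/>".toList with
    | (head, close, rest) =>
    match pvPartition head "</textarea>".toList with
    | (t_head, t_close, t_rest) =>
    if t_close ≠ [] then
      before ++ String.ofList t_head ++ String.ofList t_close ++ block ++
        String.ofList t_rest ++ String.ofList close ++ String.ofList rest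
    else if close = [] then ""  -- raise RuntimeError("Could not find control end for: …")
    else before ++ String.ofList head ++ String.ofList close ++ block ++ String.ofList rest

-- ===== PRECONDITION & SPEC =====
-- Pre_ excludes exactly the inputs where A raises RuntimeError: the value marker must occur
-- in source, and some closing token ("</textarea>" or "/>") must occur at or after it.
def Pre_insert_after_value_control (source : String) (value_marker : String) (block : String) (label : String) : Prop :=
  PySem.Str.isIn value_marker source = true ∧
    ("</textarea>".toList <:+: source.toList.drop (PySem.Chars.find source.toList value_marker.toList).toNat ∨
     "/>".toList <:+: source.toList.drop (PySem.Chars.find source.toList value_marker.toList).toNat)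
instance (source : String) (value_marker : String) (block : String) (label : String) : Decidable (Pre_insert_after_value_control source value_marker block label) := by unfold Pre_insert_after_value_control; infer_instance

def pvWitness_insert_after_value_control : String × String × String × String :=
  ("<textarea id=\"x\">v</textarea>", "id", "<p>B</p>", "lbl")

def Spec_insert_after_value_control (source : String) (value_marker : String) (block : String) (label : String) (out : String) : Prop := out = insert_after_value_control_alt source value_marker block label
instance (source : String) (value_marker : String) (block : String) (label : String) (out : String) : Decidable (Spec_insert_after_value_control source value_marker block label out) := by unfold Spec_insert_after_value_control; infer_instance

-- ===== CLAIM (what is proved, stated in full; the proofs are below) =====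
def Claim_equal_insert_after_value_control : Prop := ∀ (source : String) (value_marker : String) (block : String) (label : String), Dom_insert_after_value_control source value_marker block label → Pre_insert_after_value_control source value_marker block label → Spec_insert_after_value_control source value_marker block label (insert_after_value_control source value_marker block label)

-- ===== LEMMAS AND PROOFS =====

-- a prefix of t.drop p pins down the characters of t from position p on
lemma pv_prefix_get (p t : List Char) (j : Nat) (h : p <+: t.drop j) (d : Nat) (hd : d < p.length) :
    t[j + d]? = p[d]? := by
  obtain ⟨r, hr⟩ := h
  rw [← List.getElem?_drop, ← hr, List.getElem?_append_left hd]

-- "</textarea>" and "/>" can never overlap in a string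
lemma pv_no_overlap (t : List Char) (p q : Nat) (h1 : p < q) (h2 : q < p + 11)
    (hT : "</textarea>".toList <+: t.drop p) (hS : "/>".toList <+: t.drop q) : False := by
  have e1 : t[q + 0]? = some '/' := pv_prefix_get _ t q hS 0 (by decide)
  have e2 : t[p + (q - p)]? = ("</textarea>".toList)[q - p]? :=
    pv_prefix_get _ t p hT (q - p)
      (by rw [show ("</textarea>".toList).length = 11 from rfl]; omega)
  rw [show p + (q - p) = q + 0 by omega, e1] at e2
  have hd : q - p = 1 := by
    have hb : q - p < 11 := by omega
    have key : ∀ d, d < 11 → ("</textarea>".toList)[d]? = some '/' → d = 1 := by decide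
    exact key _ hb e2.symm
  have e3 : t[q + 1]? = some '>' := pv_prefix_get _ t q hS 1 (by decide)
  have e4 : t[p + 2]? = ("</textarea>".toList)[2]? := pv_prefix_get _ t p hT 2 (by decide)
  rw [show p + 2 = q + 1 by omega, e3] at e4
  simp at e4

-- prefix at p glues: t.take p ++ pat = t.take (p + |pat|)
lemma pv_take_append (t pat : List Char) (p : Nat) (h : pat <+: t.drop p) :
    t.take p ++ pat = t.take (p + pat.length) := by
  rw [List.take_add]
  congr 1
  exact List.prefix_iff_eq_take.mp h

-- prefix at p splits the drop: t.drop p = pat ++ t.drop (p + |pat|)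
lemma pv_drop_split (t pat : List Char) (p : Nat) (h : pat <+: t.drop p) :
    t.drop p = pat ++ t.drop (p + pat.length) := by
  obtain ⟨r, hr⟩ := h
  rw [← hr]
  congr 1
  have h2 : t.drop (p + pat.length) = (t.drop p).drop pat.length := by
    rw [List.drop_drop, Nat.add_comm]
  rw [h2, ← hr, List.drop_left]

-- prefix length fits inside the drop
lemma pv_prefix_len (t pat : List Char) (p : Nat) (hne : pat ≠ []) (h : pat <+: t.drop p) :
    p + pat.length ≤ t.length := by
  have h1 := h.length_le
  have h2 : 0 < pat.length := List.length_pos_iff.mpr hne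
  simp at h1
  omega

-- pvPartition unfolded on both branches
lemma pv_partition_neg (s sep : List Char) (h : PySem.Chars.find s sep = -1) :
    pvPartition s sep = (s, [], []) := by
  unfold pvPartition; rw [if_pos h]

lemma pv_partition_pos (s sep : List Char) (h : PySem.Chars.find s sep ≠ -1) :
    pvPartition s sep =
      (s.take (PySem.Chars.find s sep).toNat, sep,
       s.drop ((PySem.Chars.find s sep).toNat + sep.length)) := by
  unfold pvPartition; rw [if_neg h]

-- a prefix of some drop of t is an infix of t
lemma pv_infix_of_prefix_drop (p t : List Char) (j : Nat) (h : p <+: t.drop j) : p <:+: t :=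
  h.isInfix.trans (t.drop_suffix j).isInfix

-- the two closing tokens cannot start at the same position
lemma pv_not_same (t : List Char) (j : Nat)
    (hT : "</textarea>".toList <+: t.drop j) (hS : "/>".toList <+: t.drop j) : False := by
  have e1 : t[j + 0]? = some '<' := pv_prefix_get _ t j hT 0 (by decide)
  have e2 : t[j + 0]? = some '/' := pv_prefix_get _ t j hS 0 (by decide)
  rw [e1] at e2
  simp at e2

-- the three-piece glue identity shared by all non-raising cases
lemma pv_glue (src blk pat : List Char) (k m : Nat)
    (hocc : pat <+: (src.drop k).drop m) :
    src.take k ++ (src.drop k).take m ++ pat ++ blk ++ (src.drop k).drop (m + pat.length) =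
    src.take (k + m + pat.length) ++ blk ++ src.drop (k + m + pat.length) := by
  have hdd : (src.drop k).drop m = src.drop (k + m) := by rw [List.drop_drop]
  have hdd2 : (src.drop k).drop (m + pat.length) = src.drop (k + m + pat.length) := by
    rw [List.drop_drop, Nat.add_assoc]
  have h1 : src.take k ++ (src.drop k).take m = src.take (k + m) := (List.take_add ..).symm
  have h2 : src.take (k + m) ++ pat = src.take (k + m + pat.length) :=
    pv_take_append src pat (k + m) (hdd ▸ hocc)
  rw [hdd2, h1, h2]

-- the middle pieces of the both-tokens case rejoin into a single drop
lemma pv_mid (t : List Char) (p q : Nat) (hpq : p + 11 ≤ q)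
    (hS : "/>".toList <+: t.drop q) :
    (t.take q).drop (p + 11) ++ ("/>".toList ++ t.drop (q + 2)) = t.drop (p + 11) := by
  rw [List.drop_take]
  conv_rhs => rw [← List.take_append_drop (q - (p + 11)) (t.drop (p + 11))]
  congr 1
  have hdd : (t.drop (p + 11)).drop (q - (p + 11)) = t.drop q := by
    rw [List.drop_drop, show p + 11 + (q - (p + 11)) = q by omega]
  rw [hdd]
  have h2 := pv_drop_split t "/>".toList q hS
  simpa using h2.symm

-- ===== VERDICT (by name: the statement is the Claim_ definition above) =====
theorem insert_after_value_control_spec : Claim_equal_insert_after_value_control := by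
  intro source value_marker block label _hdom hpre
  obtain ⟨hin, hclose⟩ := hpre
  have hfin : value_marker.toList <:+: source.toList := (PySem.Str.isIn_iff_infix _ _).mp hin
  have hfne : PySem.Chars.find source.toList value_marker.toList ≠ -1 :=
    (PySem.Chars.find_ne_neg_one_iff _ _).mpr hfin
  have hfpos : 0 ≤ PySem.Chars.find source.toList value_marker.toList :=
    (PySem.Chars.find_nonneg_iff _ _).mpr hfin
  have hklen : (PySem.Chars.find source.toList value_marker.toList).toNat ≤ source.toList.length := by
    have h := PySem.Chars.find_le_length source.toList value_marker.toList
    omega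
  set k : Nat := (PySem.Chars.find source.toList value_marker.toList).toNat with hk
  have hfk : PySem.Chars.find source.toList value_marker.toList = (k : Int) :=
    (Int.toNat_of_nonneg hfpos).symm
  have hfneS : PySem.Str.find source value_marker ≠ -1 := by
    rw [PySem.Str.find_eq]; exact hfne
  set t : List Char := source.toList.drop k with ht
  have htail : (PySem.Str.slice source (some (PySem.Str.find source value_marker)) none).toList = t := by
    rw [PySem.Str.find_eq, hfk, PySem.Str.toList_slice, PySem.Chars.slice_eq_listSlice,
        PySem.List.slice_from_natCast, ht]
  have hbefore : (PySem.Str.slice source none (some (PySem.Str.find source value_marker))).toList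
      = source.toList.take k := by
    rw [PySem.Str.find_eq, hfk, PySem.Str.toList_slice, PySem.Chars.slice_eq_listSlice,
        PySem.List.slice_to_natCast]
  have hTA : PySem.Str.findFrom source "</textarea>" (PySem.Str.find source value_marker) =
      (if PySem.Chars.find t "</textarea>".toList = -1 then -1
       else (k : Int) + PySem.Chars.find t "</textarea>".toList) := by
    rw [PySem.Str.findFrom_eq, PySem.Str.find_eq, hfk, ht]
    exact PySem.Chars.findFrom_natCast source.toList _ k hklen
  have hSA : PySem.Str.findFrom source "/>" (PySem.Str.find source value_marker) =
      (if PySem.Chars.find t "/>".toList = -1 then -1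
       else (k : Int) + PySem.Chars.find t "/>".toList) := by
    rw [PySem.Str.findFrom_eq, PySem.Str.find_eq, hfk, ht]
    exact PySem.Chars.findFrom_natCast source.toList _ k hklen
  set pT : Int := PySem.Chars.find t "</textarea>".toList with hpT
  set pS : Int := PySem.Chars.find t "/>".toList with hpS
  unfold Spec_insert_after_value_control insert_after_value_control insert_after_value_control_alt
  rw [if_neg hfneS, if_neg hfneS]
  dsimp only
  rw [hTA, hSA, htail]
  by_cases hS : pS = -1
  · by_cases hT : pT = -1
    · exfalso
      rcases hclose with h | h
      · exact (PySem.Chars.find_eq_neg_one_iff _ _).mp (hpT ▸ hT) h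
      · exact (PySem.Chars.find_eq_neg_one_iff _ _).mp (hpS ▸ hS) h
    · -- only "</textarea>" occurs after the marker
      have hT0 : (0 : Int) ≤ pT := by
        have h := PySem.Chars.neg_one_le_find t "</textarea>".toList
        rw [← hpT] at h
        omega
      set p : Nat := pT.toNat with hp
      have hpT' : pT = (p : Int) := (Int.toNat_of_nonneg hT0).symm
      obtain ⟨hocc, _hminT⟩ := PySem.Chars.find_spec (hpT ▸ hT0 : (0:Int) ≤ PySem.Chars.find t "</textarea>".toList)
      rw [pv_partition_neg t _ (hpS ▸ hS)]
      dsimp only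
      rw [pv_partition_pos t _ (hpT ▸ hT)]
      dsimp only
      rw [← hpT, ← hp]
      rw [if_pos (by decide : ("</textarea>".toList : List Char) ≠ [])]
      rw [if_neg hT, if_pos hS]
      have hne1 : ((k : Int) + pT) ≠ -1 := by rw [hpT']; omega
      have hfilt : List.filter (fun x => decide (x ≠ -1)) [(k : Int) + pT, -1]
          = [(k : Int) + pT] := by
        simp [hne1]
      rw [hfilt, if_neg (by simp)]
      have hmin : PySem.List.min? [(k : Int) + pT] (fun x => x) = some ((k : Int) + pT) := by
        simp [PySem.List.min?]
      rw [hmin]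
      dsimp only
      rw [if_pos rfl, hpT']
      have hcast : ((k : Int) + (p : Int) + 11) = ((k + p + 11 : Nat) : Int) := by push_cast; ring
      rw [hcast]
      apply String.toList_inj.mp
      simp only [String.toList_append, PySem.Str.toList_slice, PySem.Chars.slice_eq_listSlice,
        PySem.List.slice_to_natCast, PySem.List.slice_from_natCast, String.toList_ofList,
        List.append_nil, PySem.Str.find_eq, hfk]
      have hg := pv_glue source.toList block.toList "</textarea>".toList k p (by rw [← ht]; exact hocc)
      rw [← ht] at hg
      exact hg.symm
  · -- "/>" occurs after the marker
    have hS0 : (0 : Int) ≤ pS := by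
      have h := PySem.Chars.neg_one_le_find t "/>".toList
      rw [← hpS] at h
      omega
    set q : Nat := pS.toNat with hq
    have hpS' : pS = (q : Int) := (Int.toNat_of_nonneg hS0).symm
    obtain ⟨hoccS, hminS⟩ :=
      PySem.Chars.find_spec (hpS ▸ hS0 : (0 : Int) ≤ PySem.Chars.find t "/>".toList)
    rw [← hpS, ← hq] at hoccS hminS
    rw [pv_partition_pos t _ (hpS ▸ hS)]
    dsimp only
    rw [← hpS, ← hq]
    set pH : Int := PySem.Chars.find (t.take q) "</textarea>".toList with hpH
    by_cases hH : pH = -1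
    · -- no "</textarea>" before the first "/>"
      rw [pv_partition_neg _ _ (hpH ▸ hH)]
      dsimp only
      rw [if_neg (by simp : ¬(([] : List Char) ≠ [])),
          if_neg (by decide : ¬("/>".toList = ([] : List Char)))]
      have hneS : ((k : Int) + pS) ≠ -1 := by rw [hpS']; omega
      by_cases hT : pT = -1
      · rw [if_pos hT, if_neg hS]
        have hfilt : List.filter (fun x => decide (x ≠ -1)) [(-1 : Int), (k : Int) + pS]
            = [(k : Int) + pS] := by simp [hneS]
        rw [hfilt, if_neg (by simp)]
        have hmin : PySem.List.min? [(k : Int) + pS] (fun x => x) = some ((k : Int) + pS) := by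
          simp [PySem.List.min?]
        rw [hmin]
        dsimp only
        rw [if_neg (by rw [hpS']; omega : ¬((k : Int) + pS = -1)), hpS']
        have hcast : ((k : Int) + (q : Int) + 2) = ((k + q + 2 : Nat) : Int) := by push_cast; ring
        rw [hcast]
        apply String.toList_inj.mp
        simp only [String.toList_append, PySem.Str.toList_slice, PySem.Chars.slice_eq_listSlice,
          PySem.List.slice_to_natCast, PySem.List.slice_from_natCast, String.toList_ofList,
          PySem.Str.find_eq, hfk]
        have hg := pv_glue source.toList block.toList "/>".toList k q
          (by rw [← ht]; exact hoccS)
        rw [← ht] at hg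
        exact hg.symm
      · -- a "</textarea>" exists in t but only after the first "/>"
        have hT0 : (0 : Int) ≤ pT := by
          have h := PySem.Chars.neg_one_le_find t "</textarea>".toList
          rw [← hpT] at h
          omega
        obtain ⟨hoccT, hminT⟩ :=
          PySem.Chars.find_spec (hpT ▸ hT0 : (0 : Int) ≤ PySem.Chars.find t "</textarea>".toList)
        rw [← hpT] at hoccT hminT
        have hqlt : q < pT.toNat := by
          by_contra hc
          push_neg at hc
          have hneq : pT.toNat ≠ q := by
            intro he
            exact pv_not_same t q (he ▸ hoccT) hoccS
          have hlt : pT.toNat < q := by omega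
          have h11 : pT.toNat + 11 ≤ q := by
            by_contra hc2
            exact pv_no_overlap t pT.toNat q hlt (by omega) hoccT hoccS
          have hin' : "</textarea>".toList <+: (t.take q).drop pT.toNat := by
            rw [List.drop_take]
            exact List.prefix_take_iff.mpr ⟨hoccT, by simp; omega⟩
          exact (PySem.Chars.find_eq_neg_one_iff _ _).mp (hpH ▸ hH)
            (pv_infix_of_prefix_drop _ _ _ hin')
        have hTne : ((k : Int) + pT) ≠ -1 := by omega
        rw [if_neg hT, if_neg hS]
        have hfilt : List.filter (fun x => decide (x ≠ -1)) [(k : Int) + pT, (k : Int) + pS]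
            = [(k : Int) + pT, (k : Int) + pS] := by simp [hTne, hneS]
        rw [hfilt, if_neg (by simp)]
        have hmin2 : PySem.List.min? [(k : Int) + pT, (k : Int) + pS] (fun x => x)
            = if (k : Int) + pS < (k : Int) + pT then some ((k : Int) + pS)
              else some ((k : Int) + pT) := by simp [PySem.List.min?]
        have hlt : (k : Int) + pS < (k : Int) + pT := by
          rw [hpS']
          omega
        rw [hmin2, if_pos hlt]
        dsimp only
        rw [if_neg (by omega : ¬((k : Int) + pS = (k : Int) + pT)), hpS']
        have hcast : ((k : Int) + (q : Int) + 2) = ((k + q + 2 : Nat) : Int) := by push_cast; ring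
        rw [hcast]
        apply String.toList_inj.mp
        simp only [String.toList_append, PySem.Str.toList_slice, PySem.Chars.slice_eq_listSlice,
          PySem.List.slice_to_natCast, PySem.List.slice_from_natCast, String.toList_ofList,
          PySem.Str.find_eq, hfk]
        have hg := pv_glue source.toList block.toList "/>".toList k q
          (by rw [← ht]; exact hoccS)
        rw [← ht] at hg
        exact hg.symm
    · -- a "</textarea>" occurs before the first "/>"
      have hH0 : (0 : Int) ≤ pH := by
        have h := PySem.Chars.neg_one_le_find (t.take q) "</textarea>".toList
        rw [← hpH] at h
        omega
      set p : Nat := pH.toNat with hp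
      obtain ⟨hoccH, hminH⟩ :=
        PySem.Chars.find_spec
          (hpH ▸ hH0 : (0 : Int) ≤ PySem.Chars.find (t.take q) "</textarea>".toList)
      rw [← hpH, ← hp] at hoccH hminH
      have hoccH' : "</textarea>".toList <+: (t.drop p).take (q - p) := by
        rw [← List.drop_take]
        exact hoccH
      have hTp : "</textarea>".toList <+: t.drop p := (List.prefix_take_iff.mp hoccH').1
      have hple : p + 11 ≤ q := by
        have h1 := (List.prefix_take_iff.mp hoccH').2
        have h2 := pv_prefix_len (t.take q) "</textarea>".toList p (by decide) hoccH
        simp at h1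
        omega
      -- the first "</textarea>" in t is exactly at p
      have hTfind : pT = (p : Int) := by
        have hTne : pT ≠ -1 := by
          rw [hpT]
          exact (PySem.Chars.find_ne_neg_one_iff _ _).mpr (pv_infix_of_prefix_drop _ _ _ hTp)
        have hT0 : (0 : Int) ≤ pT := by
          have h := PySem.Chars.neg_one_le_find t "</textarea>".toList
          rw [← hpT] at h
          omega
        obtain ⟨hoccT, hminT⟩ :=
          PySem.Chars.find_spec (hpT ▸ hT0 : (0 : Int) ≤ PySem.Chars.find t "</textarea>".toList)
        rw [← hpT] at hoccT hminT
        have hge : p ≤ pT.toNat := by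
          by_contra hc
          push_neg at hc
          have hin' : "</textarea>".toList <+: (t.take q).drop pT.toNat := by
            rw [List.drop_take]
            exact List.prefix_take_iff.mpr ⟨hoccT, by simp; omega⟩
          exact hminH pT.toNat hc hin'
        have hle : pT.toNat ≤ p := by
          by_contra hc
          push_neg at hc
          exact hminT p hc hTp
        omega
      rw [pv_partition_pos _ _ (hpH ▸ hH)]
      dsimp only
      rw [← hpH, ← hp]
      rw [if_pos (by decide : ("</textarea>".toList : List Char) ≠ [])]
      rw [if_neg (by rw [hTfind]; omega : ¬(pT = -1)), if_neg hS]
      have hTne' : ((k : Int) + pT) ≠ -1 := by rw [hTfind]; omega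
      have hneS : ((k : Int) + pS) ≠ -1 := by rw [hpS']; omega
      have hfilt : List.filter (fun x => decide (x ≠ -1)) [(k : Int) + pT, (k : Int) + pS]
          = [(k : Int) + pT, (k : Int) + pS] := by simp [hTne', hneS]
      rw [hfilt, if_neg (by simp)]
      have hmin2 : PySem.List.min? [(k : Int) + pT, (k : Int) + pS] (fun x => x)
          = if (k : Int) + pS < (k : Int) + pT then some ((k : Int) + pS)
            else some ((k : Int) + pT) := by simp [PySem.List.min?]
      have hnlt : ¬((k : Int) + pS < (k : Int) + pT) := by
        rw [hpS', hTfind]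
        omega
      rw [hmin2, if_neg hnlt]
      dsimp only
      rw [if_pos rfl, hTfind]
      have hcast : ((k : Int) + (p : Int) + 11) = ((k + p + 11 : Nat) : Int) := by push_cast; ring
      rw [hcast]
      apply String.toList_inj.mp
      simp only [String.toList_append, PySem.Str.toList_slice, PySem.Chars.slice_eq_listSlice,
        PySem.List.slice_to_natCast, PySem.List.slice_from_natCast, String.toList_ofList,
        PySem.Str.find_eq, hfk]
      have htk : (t.take q).take p = t.take p := by
        rw [List.take_take, min_eq_left (by omega)]
      rw [htk]
      have hmid := pv_mid t p q hple hoccS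
      simp only [List.append_assoc]
      rw [show ("</textarea>".toList : List Char).length = 11 from rfl,
          show ("/>".toList : List Char).length = 2 from rfl, hmid]
      have hg := pv_glue source.toList block.toList "</textarea>".toList k p
        (by rw [← ht]; exact hTp)
      rw [← ht] at hg
      simp only [List.append_assoc] at hg
      exact hg.symm
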